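-- pv_equiv track=rewrite | github.com/broheat/Programmers | level1/모의고사/solution.py | solution
-- ===== SOURCE A (Python) =====
-- def answer_sheets(answers):
--     way_to_guess_1 = [1,2,3,4,5]
--     way_to_guess_2 = [2,1,2,3,2,4,2,5]
--     way_to_guess_3 = [3,3,1,1,2,2,4,4,5,5]
--
--     length_answers = len(answers)
--     length_guess_1 = len(way_to_guess_1)
--     length_guess_2 = len(way_to_guess_2)
--     length_guess_3 = len(way_to_guess_3)
--
--     divmod_1 = divmod(length_answers, length_guess_1)
--     divmod_2 = divmod(length_answers, length_guess_2)
--     divmod_3 = divmod(length_answers, length_guess_3)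
--
--     answer_sheet_1 = way_to_guess_1*(divmod_1[0])+way_to_guess_1[:divmod_1[1]]
--     answer_sheet_2 = way_to_guess_2*(divmod_2[0])+way_to_guess_2[:divmod_2[1]]
--     answer_sheet_3 = way_to_guess_3*(divmod_3[0])+way_to_guess_3[:divmod_3[1]]
--
--     return [answer_sheet_1, answer_sheet_2, answer_sheet_3]
--
-- def right_answer_num(answers,answer_sheet):
--     right_answer_num = 0
--     for i in range(len(answers)):
--         if answers[i] == answer_sheet[i]:
--             right_answer_num += 1
--     return right_answer_num
--
-- def solution(answers):
--     answer_sheet = answer_sheets(answers)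
--     right_answer_nums = {}
--     right_answer_nums[1] = right_answer_num(answers, answer_sheet[0])
--     right_answer_nums[2] = right_answer_num(answers, answer_sheet[1])
--     right_answer_nums[3] = right_answer_num(answers, answer_sheet[2])
--     keys = [key for key, value in right_answer_nums.items() if value == max(right_answer_nums.values())]
--     result = keys
--
--     return result
-- ===== SOURCE B (Python) =====
-- def solution(answers):
--     p1 = [1, 2, 3, 4, 5]
--     p2 = [2, 1, 2, 3, 2, 4, 2, 5]
--     p3 = [3, 3, 1, 1, 2, 2, 4, 4, 5, 5]
--     c1 = c2 = c3 = 0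
--     for i, a in enumerate(answers):
--         if a == p1[i % 5]:
--             c1 += 1
--         if a == p2[i % 8]:
--             c2 += 1
--         if a == p3[i % 10]:
--             c3 += 1
--     m = max(c1, c2, c3)
--     return [k for k, c in ((1, c1), (2, c2), (3, c3)) if c == m]
-- ===== Notes on version B (the rewrite author's own statement) =====
-- stated objective: simpler
-- what changed: Replaces materializing three full repeated answer sheets (list multiplication + slice) and three separate index-scans with a single pass over the answers using modular indexing into the fixed patterns, keeping three counters.
import Mathlib
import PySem

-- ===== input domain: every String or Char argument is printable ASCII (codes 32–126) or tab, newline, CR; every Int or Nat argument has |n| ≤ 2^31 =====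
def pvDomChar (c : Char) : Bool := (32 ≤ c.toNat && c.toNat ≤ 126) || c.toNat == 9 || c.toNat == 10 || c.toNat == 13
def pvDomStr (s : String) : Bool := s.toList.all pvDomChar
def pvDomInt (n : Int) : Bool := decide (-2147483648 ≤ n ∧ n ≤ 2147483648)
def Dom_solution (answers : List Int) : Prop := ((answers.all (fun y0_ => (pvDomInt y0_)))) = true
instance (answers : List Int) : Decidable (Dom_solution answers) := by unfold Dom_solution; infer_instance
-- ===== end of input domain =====

-- ===== PORT A =====
-- A: build three full repeated answer sheets (list-multiplication + slice), score each by an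
-- index scan, collect dict keys whose value equals the max.  B: one pass with modular indexing.
-- q = n // L is nonnegative (n = len(answers) ≥ 0), so .toNat on it is exact here.
def answerSheets (answers : List Int) : List (List Int) :=
  let w1 : List Int := [1, 2, 3, 4, 5]
  let w2 : List Int := [2, 1, 2, 3, 2, 4, 2, 5]
  let w3 : List Int := [3, 3, 1, 1, 2, 2, 4, 4, 5, 5]
  let n : Int := (answers.length : Int)
  let d1 := (PySem.Int.floordiv n (w1.length : Int), PySem.Int.mod n (w1.length : Int))
  let d2 := (PySem.Int.floordiv n (w2.length : Int), PySem.Int.mod n (w2.length : Int))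
  let d3 := (PySem.Int.floordiv n (w3.length : Int), PySem.Int.mod n (w3.length : Int))
  let s1 := (List.replicate d1.1.toNat w1).flatten ++ PySem.List.slice w1 none (some d1.2)
  let s2 := (List.replicate d2.1.toNat w2).flatten ++ PySem.List.slice w2 none (some d2.2)
  let s3 := (List.replicate d3.1.toNat w3).flatten ++ PySem.List.slice w3 none (some d3.2)
  [s1, s2, s3]

def rightAnswerNum (answers sheet : List Int) : Int :=
  (PySem.List.pyRange 0 (answers.length : Int) 1).foldl
    (fun acc i =>
      if PySem.List.pyGetD answers i 0 = PySem.List.pyGetD sheet i 0 then acc + 1 else acc) 0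

-- the dict {1: r1, 2: r2, 3: r3} iterates in insertion order; its items list is explicit here
def solution (answers : List Int) : List Int :=
  let sheets := answerSheets answers
  let r1 := rightAnswerNum answers (sheets.getD 0 [])
  let r2 := rightAnswerNum answers (sheets.getD 1 [])
  let r3 := rightAnswerNum answers (sheets.getD 2 [])
  let m := ((PySem.List.max? [r1, r2, r3] id).getD 0)
  ([(1, r1), (2, r2), (3, r3)] : List (Int × Int)).filterMap
    (fun p => if p.2 = m then some p.1 else none)

-- ===== PORT B =====
def solution_alt (answers : List Int) : List Int :=
  let p1 : List Int := [1, 2, 3, 4, 5]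
  let p2 : List Int := [2, 1, 2, 3, 2, 4, 2, 5]
  let p3 : List Int := [3, 3, 1, 1, 2, 2, 4, 4, 5, 5]
  let c := (PySem.List.enumerate answers).foldl
    (fun (c : Int × Int × Int) ia =>
      (c.1 + (if ia.2 = PySem.List.pyGetD p1 (PySem.Int.mod ia.1 5) 0 then 1 else 0),
       c.2.1 + (if ia.2 = PySem.List.pyGetD p2 (PySem.Int.mod ia.1 8) 0 then 1 else 0),
       c.2.2 + (if ia.2 = PySem.List.pyGetD p3 (PySem.Int.mod ia.1 10) 0 then 1 else 0)))
    (0, 0, 0)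
  let m := max c.1 (max c.2.1 c.2.2)
  ([(1, c.1), (2, c.2.1), (3, c.2.2)] : List (Int × Int)).filterMap
    (fun p => if p.2 = m then some p.1 else none)

-- ===== PRECONDITION & SPEC =====
def Spec_solution (answers : List Int) (out : List Int) : Prop := out = solution_alt answers
instance (answers : List Int) (out : List Int) : Decidable (Spec_solution answers out) := by unfold Spec_solution; infer_instance

-- ===== CLAIM (what is proved, stated in full; the proofs are below) =====
def Claim_equal_solution : Prop := ∀ (answers : List Int), Dom_solution answers → Spec_solution answers (solution answers)

-- ===== LEMMAS AND PROOFS =====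

-- reference count: matches of `answers` against pattern `p` cyclically, starting at position i
def cnt (p : List Int) : Nat → List Int → Int
  | _, [] => 0
  | i, a :: t => (if a = p.getD (i % p.length) 0 then 1 else 0) + cnt p (i + 1) t

-- the repeated sheet agrees with the pattern at index mod its length
theorem sheet_getD (p : List Int) (hp : p ≠ []) :
    ∀ (q : Nat) (r j : Nat), r ≤ p.length → j < q * p.length + r →
      ((List.replicate q p).flatten ++ p.take r).getD j 0 = p.getD (j % p.length) 0 := by
  intro q
  induction q with
  | zero =>
    intro r j hr hj
    simp only [Nat.zero_mul, Nat.zero_add] at hj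
    have hjp : j < p.length := lt_of_lt_of_le hj hr
    rw [Nat.mod_eq_of_lt hjp]
    simp only [List.replicate_zero, List.flatten_nil, List.nil_append]
    simp [List.getD, hj]
  | succ q ih =>
    intro r j hr hj
    have hflat : (List.replicate (q + 1) p).flatten = p ++ (List.replicate q p).flatten := by
      simp [List.replicate_succ]
    rw [hflat, List.append_assoc]
    by_cases hjl : j < p.length
    · rw [List.getD_append _ _ _ _ hjl, Nat.mod_eq_of_lt hjl]
    · push Not at hjl
      rw [List.getD_append_right _ _ _ _ hjl]
      have hlen : 0 < p.length := List.length_pos_iff.mpr hp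
      have := ih r (j - p.length) hr (by
        have : (q + 1) * p.length = p.length + q * p.length := by ring
        omega)
      rw [this, Nat.mod_eq_sub_mod hjl]

-- A's scoring loop equals the cyclic count
theorem rightAnswerNum_eq_cnt (answers sheet p : List Int)
    (h : ∀ j : Nat, j < answers.length →
        PySem.List.pyGetD sheet ((j : Nat) : Int) 0 = p.getD (j % p.length) 0) :
    rightAnswerNum answers sheet = cnt p 0 answers := by
  have key : ∀ (k i : Nat), answers.length = i + k → ∀ acc : Int,
      (PySem.List.pyRange (i : Int) (answers.length : Int) 1).foldl
        (fun acc j =>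
          if PySem.List.pyGetD answers j 0 = PySem.List.pyGetD sheet j 0 then acc + 1 else acc)
        acc = acc + cnt p i (answers.drop i) := by
    intro k
    induction k with
    | zero =>
      intro i hi acc
      rw [PySem.List.pyRange_one_eq_nil (by omega)]
      rw [List.drop_of_length_le (by omega)]
      simp [cnt]
    | succ k ih =>
      intro i hi acc
      have hilt : i < answers.length := by omega
      rw [PySem.List.pyRange_one_cons (by exact_mod_cast hilt)]
      simp only [List.foldl_cons]
      have hcast : ((i : Int) + 1) = (((i + 1 : Nat)) : Int) := by push_cast; ring
      rw [hcast, ih (i + 1) (by omega)]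
      rw [List.drop_eq_getElem_cons hilt]
      simp only [cnt]
      rw [PySem.List.pyGetD_natCast answers i 0, h i hilt]
      rw [List.getD_eq_getElem?_getD, List.getElem?_eq_getElem hilt]
      simp only [Option.getD_some]
      split_ifs <;> ring
  have h0 := key answers.length 0 (by omega) 0
  simpa [rightAnswerNum] using h0

-- B's fold computes the three cyclic counts
theorem foldB_eq_cnt (p1 p2 p3 : List Int) (h1 : p1.length = 5) (h2 : p2.length = 8)
    (h3 : p3.length = 10) :
    ∀ (t : List Int) (i : Nat) (x y z : Int),
      (PySem.List.enumerate t (i : Int)).foldl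
        (fun (c : Int × Int × Int) ia =>
          (c.1 + (if ia.2 = PySem.List.pyGetD p1 (PySem.Int.mod ia.1 5) 0 then 1 else 0),
           c.2.1 + (if ia.2 = PySem.List.pyGetD p2 (PySem.Int.mod ia.1 8) 0 then 1 else 0),
           c.2.2 + (if ia.2 = PySem.List.pyGetD p3 (PySem.Int.mod ia.1 10) 0 then 1 else 0)))
        (x, y, z)
      = (x + cnt p1 i t, y + cnt p2 i t, z + cnt p3 i t) := by
  intro t
  induction t with
  | nil => intro i x y z; simp [PySem.List.enumerate, cnt]
  | cons a t ih =>
    intro i x y z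
    rw [show PySem.List.enumerate (a :: t) (i : Int)
          = ((i : Int), a) :: PySem.List.enumerate t ((i : Int) + 1) from rfl]
    simp only [List.foldl_cons]
    have hcast : ((i : Int) + 1) = (((i + 1 : Nat)) : Int) := by push_cast; ring
    rw [hcast, ih (i + 1)]
    have e1 : PySem.Int.mod ((i : Nat) : Int) 5 = (((i % 5 : Nat)) : Int) := by
      exact_mod_cast PySem.Int.mod_natCast i 5
    have e2 : PySem.Int.mod ((i : Nat) : Int) 8 = (((i % 8 : Nat)) : Int) := by
      exact_mod_cast PySem.Int.mod_natCast i 8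
    have e3 : PySem.Int.mod ((i : Nat) : Int) 10 = (((i % 10 : Nat)) : Int) := by
      exact_mod_cast PySem.Int.mod_natCast i 10
    simp only [cnt, e1, e2, e3, PySem.List.pyGetD_natCast, h1, h2, h3, Prod.mk.injEq]
    refine ⟨by split_ifs <;> ring, by split_ifs <;> ring, by split_ifs <;> ring⟩

theorem max?_three (x y z : Int) :
    (PySem.List.max? [x, y, z] id).getD 0 = max x (max y z) := by
  simp only [PySem.List.max?, List.foldl_cons, List.foldl_nil, id]
  by_cases h1 : x < y
  · simp only [if_pos h1]
    by_cases h2 : y < z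
    · simp only [if_pos h2, Option.getD_some]; omega
    · simp only [if_neg h2, Option.getD_some]; omega
  · simp only [if_neg h1]
    by_cases h2 : x < z
    · simp only [if_pos h2, Option.getD_some]; omega
    · simp only [if_neg h2, Option.getD_some]; omega

-- the sheets of A score like the cyclic counts
theorem sheets_score (answers : List Int) (p : List Int) (hp : 1 ≤ p.length) :
    rightAnswerNum answers
      ((List.replicate (PySem.Int.floordiv (answers.length : Int) (p.length : Int)).toNat
          p).flatten ++
        PySem.List.slice p none (some (PySem.Int.mod (answers.length : Int) (p.length : Int))))
      = cnt p 0 answers := by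
  have hq : PySem.Int.floordiv (answers.length : Int) (p.length : Int)
      = (((answers.length / p.length : Nat)) : Int) := PySem.Int.floordiv_natCast _ _
  have hr : PySem.Int.mod (answers.length : Int) (p.length : Int)
      = (((answers.length % p.length : Nat)) : Int) := PySem.Int.mod_natCast _ _
  rw [hq, hr, PySem.List.slice_to_natCast, Int.toNat_natCast]
  apply rightAnswerNum_eq_cnt
  intro j hj
  rw [PySem.List.pyGetD_natCast]
  exact sheet_getD p (by intro he; simp [he] at hp)
    (answers.length / p.length) (answers.length % p.length) j
    (Nat.le_of_lt (Nat.mod_lt _ (by omega)))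
    (by
      have hd : p.length * (answers.length / p.length) + answers.length % p.length
          = answers.length := Nat.div_add_mod _ _
      rw [Nat.mul_comm, hd]; exact hj)

-- ===== VERDICT (by name: the statement is the Claim_ definition above) =====
theorem solution_spec : Claim_equal_solution := by
  intro answers _
  unfold Spec_solution solution solution_alt answerSheets
  simp only [List.getD_cons_zero, List.getD_cons_succ]
  rw [sheets_score answers [1, 2, 3, 4, 5] (by simp),
      sheets_score answers [2, 1, 2, 3, 2, 4, 2, 5] (by simp),
      sheets_score answers [3, 3, 1, 1, 2, 2, 4, 4, 5, 5] (by simp)]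
  rw [show ((0 : Int), (0 : Int), (0 : Int)) = (((0:Int),(0:Int),(0:Int)) : Int × Int × Int) from rfl]
  rw [show PySem.List.enumerate answers 0 = PySem.List.enumerate answers ((0 : Nat) : Int) by norm_num]
  rw [foldB_eq_cnt [1,2,3,4,5] [2,1,2,3,2,4,2,5] [3,3,1,1,2,2,4,4,5,5] rfl rfl rfl answers 0 0 0 0]
  simp [max?_three]
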